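-- pv_equiv track=rewrite | github.com/rudy-digipen/VisualizeSGJobs | etl.py | _suggest_target
-- ===== SOURCE A (Python) =====
-- from collections import Counter, defaultdict
--
-- def _suggest_target(raw_value, normalize_map):
--     """Suggest a normalization target using substring matching.
--
--     Checks if any existing map key is a substring of raw_value or vice versa,
--     then returns the target that key maps to.
--     """
--     raw_lower = raw_value.lower()
--     # Build reverse map: target → [keys]
--     targets = defaultdict(list)
--     for key, target in normalize_map.items():
--         targets[target].append(key)
--
--     # Check if raw_value contains an existing key as substring
--     for key, target in normalize_map.items():
--         if key.lower() in raw_lower and key.lower() != raw_lower: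
--             return target
--     # Check if an existing key contains raw_value
--     for key, target in normalize_map.items():
--         if raw_lower in key.lower() and key.lower() != raw_lower:
--             return target
--     return None
-- ===== SOURCE B (Python) =====
-- def _suggest_target(raw_value, normalize_map):
--     """Single pass: return the first forward (key-in-raw) match immediately;
--     remember the first reverse (raw-in-key) match and fall back to it."""
--     raw_lower = raw_value.lower()
--     reverse_hit = None
--     for key, target in normalize_map.items():
--         key_lower = key.lower()
--         if key_lower != raw_lower:
--             if key_lower in raw_lower:
--                 return target
--             if reverse_hit is None and raw_lower in key_lower:
--                 reverse_hit = target
--     return reverse_hit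
-- ===== Notes on version B (the rewrite author's own statement) =====
-- stated objective: simpler
-- what changed: Replaced A's two separate scans (and its unused defaultdict reverse-map construction) with a single loop that returns a forward match immediately and keeps the first reverse match as a fallback.
import Mathlib
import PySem

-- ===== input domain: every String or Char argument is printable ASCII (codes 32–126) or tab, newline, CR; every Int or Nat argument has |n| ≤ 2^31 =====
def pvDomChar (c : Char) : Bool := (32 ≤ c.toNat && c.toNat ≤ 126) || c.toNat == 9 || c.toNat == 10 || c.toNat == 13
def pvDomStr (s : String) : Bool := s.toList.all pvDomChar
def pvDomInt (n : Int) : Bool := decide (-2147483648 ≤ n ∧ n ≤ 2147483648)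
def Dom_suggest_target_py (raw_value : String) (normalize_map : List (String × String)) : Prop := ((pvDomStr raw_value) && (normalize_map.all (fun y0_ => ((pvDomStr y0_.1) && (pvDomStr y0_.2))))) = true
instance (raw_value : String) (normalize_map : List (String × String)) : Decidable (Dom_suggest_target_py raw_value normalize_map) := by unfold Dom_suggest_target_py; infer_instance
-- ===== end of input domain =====

-- B replaces A's two scans (and its unused reverse-map construction) by one loop with a
-- remembered first reverse match; objective: simpler.

-- ===== PORT A =====
-- first loop of A: forward match (key.lower() in raw_lower and key.lower() != raw_lower)
def stpLoopFwd (raw_lower : String) : List (String × String) → Option String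
  | [] => none
  | (k, t) :: rest =>
    if PySem.Str.isIn (PySem.Str.lower k) raw_lower && !(PySem.Str.lower k == raw_lower)
    then some t else stpLoopFwd raw_lower rest

-- second loop of A: reverse match (raw_lower in key.lower() and key.lower() != raw_lower)
def stpLoopRev (raw_lower : String) : List (String × String) → Option String
  | [] => none
  | (k, t) :: rest =>
    if PySem.Str.isIn raw_lower (PySem.Str.lower k) && !(PySem.Str.lower k == raw_lower)
    then some t else stpLoopRev raw_lower rest

def suggest_target_py (raw_value : String) (normalize_map : List (String × String)) : Option String :=
  let raw_lower := PySem.Str.lower raw_value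
  -- A builds a reverse map targets : target → [keys] and never uses it; transliterated, unused
  let _targets : PySem.Dict String (List String) :=
    normalize_map.foldl
      (fun d kt => d.insert kt.2 ((d.getD kt.2 []) ++ [kt.1])) PySem.Dict.empty
  match stpLoopFwd raw_lower normalize_map with
  | some t => some t
  | none => stpLoopRev raw_lower normalize_map

-- ===== PORT B =====
-- single loop: return on forward match, remember first reverse match in reverse_hit
def stpScan (raw_lower : String) (reverse_hit : Option String) :
    List (String × String) → Option String
  | [] => reverse_hit
  | (k, t) :: rest =>
    let key_lower := PySem.Str.lower k
    if !(key_lower == raw_lower) then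
      if PySem.Str.isIn key_lower raw_lower then some t
      else if reverse_hit.isNone && PySem.Str.isIn raw_lower key_lower then
        stpScan raw_lower (some t) rest
      else stpScan raw_lower reverse_hit rest
    else stpScan raw_lower reverse_hit rest

def suggest_target_py_alt (raw_value : String) (normalize_map : List (String × String)) : Option String :=
  stpScan (PySem.Str.lower raw_value) none normalize_map

-- ===== PRECONDITION & SPEC =====
def Spec_suggest_target_py (raw_value : String) (normalize_map : List (String × String)) (out : Option String) : Prop := out = suggest_target_py_alt raw_value normalize_map
instance (raw_value : String) (normalize_map : List (String × String)) (out : Option String) : Decidable (Spec_suggest_target_py raw_value normalize_map out) := by unfold Spec_suggest_target_py; infer_instance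

-- ===== CLAIM =====
def Claim_equal_suggest_target_py : Prop := ∀ (raw_value : String) (normalize_map : List (String × String)), Dom_suggest_target_py raw_value normalize_map → Spec_suggest_target_py raw_value normalize_map (suggest_target_py raw_value normalize_map)

-- ===== LEMMAS AND PROOFS =====
-- invariant of B's loop: forward match first, else the stored reverse_hit, else reverse match
theorem stpScan_eq (raw_lower : String) (acc : Option String)
    (l : List (String × String)) :
    stpScan raw_lower acc l =
      match stpLoopFwd raw_lower l with
      | some t => some t
      | none =>
        match acc with
        | some a => some a
        | none => stpLoopRev raw_lower l := by
  induction l generalizing acc with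
  | nil => cases acc <;> simp [stpScan, stpLoopFwd, stpLoopRev]
  | cons kt rest ih =>
    obtain ⟨k, t⟩ := kt
    simp only [stpScan, stpLoopFwd, stpLoopRev]
    by_cases heq : PySem.Str.lower k == raw_lower
    · simp [heq, ih]
    · by_cases hf : PySem.Chars.isIn (PySem.Chars.lower k.toList) raw_lower.toList
      · simp [heq, hf]
      · by_cases hr : PySem.Chars.isIn raw_lower.toList (PySem.Chars.lower k.toList)
        · cases acc <;> cases hF : stpLoopFwd raw_lower rest <;>
            simp [heq, hf, hr, hF, ih]
        · cases acc <;> cases hF : stpLoopFwd raw_lower rest <;>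
            simp [heq, hf, hr, hF, ih]

-- ===== VERDICT =====
theorem suggest_target_py_spec : Claim_equal_suggest_target_py := by
  intro raw_value normalize_map _
  unfold Spec_suggest_target_py suggest_target_py suggest_target_py_alt
  rw [stpScan_eq]
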